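-- pv_equiv track=rewrite | github.com/AbeWolthuis/CounterpointConsensus | src/merge_python_files.py | remove_if_name_main_block
-- ===== SOURCE A (Python) =====
-- def remove_if_name_main_block(lines):
--     """
--     Remove any top-level block that starts with `if __name__ == '__main__':`.
--     Skips that line + all indented lines until we reach a new top-level statement.
--     """
--     new_lines = []
--     skipping = False
--     for line in lines:
--         if not skipping:
--             # Check if line is top-level and has `if __name__` in it
--             if line.lstrip() == line and "if __name__" in line and "__main__" in line:
--                 skipping = True
--             else:
--                 new_lines.append(line)
--         else:
--             # We are skipping lines until we hit a new top-level statement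
--             if line.lstrip() == line:
--                 # This is a new top-level line
--                 # check if it is another if __name__ block or something else
--                 if ("if __name__" in line and "__main__" in line):
--                     # remain skipping
--                     skipping = True
--                 else:
--                     skipping = False
--                     new_lines.append(line)
--             # else keep skipping
--     return new_lines
-- ===== SOURCE B (Python) =====
-- def remove_if_name_main_block(lines):
--     """
--     Remove any top-level block that starts with `if __name__ == '__main__':`.
--     Index-based: on a top-level `if __name__`/`__main__` line, an inner loop
--     advances past all indented lines, handing the next top-level line back to
--     the outer loop.
--     """
--     new_lines = []
--     i = 0
--     n = len(lines)
--     while i < n: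
--         line = lines[i]
--         if line.lstrip() == line and "if __name__" in line and "__main__" in line:
--             i += 1
--             while i < n:
--                 inner = lines[i]
--                 if inner.lstrip() == inner:
--                     break
--                 i += 1
--         else:
--             new_lines.append(line)
--             i += 1
--     return new_lines
-- ===== Notes on version B (the rewrite author's own statement) =====
-- stated objective: alternative
-- what changed: Replaces A's boolean skipping flag threaded through one pass with an index/cursor walk: a nested inner loop consumes the indented lines of a matched block and hands the terminating top-level line back to the outer loop for reprocessing.
import Mathlib
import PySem

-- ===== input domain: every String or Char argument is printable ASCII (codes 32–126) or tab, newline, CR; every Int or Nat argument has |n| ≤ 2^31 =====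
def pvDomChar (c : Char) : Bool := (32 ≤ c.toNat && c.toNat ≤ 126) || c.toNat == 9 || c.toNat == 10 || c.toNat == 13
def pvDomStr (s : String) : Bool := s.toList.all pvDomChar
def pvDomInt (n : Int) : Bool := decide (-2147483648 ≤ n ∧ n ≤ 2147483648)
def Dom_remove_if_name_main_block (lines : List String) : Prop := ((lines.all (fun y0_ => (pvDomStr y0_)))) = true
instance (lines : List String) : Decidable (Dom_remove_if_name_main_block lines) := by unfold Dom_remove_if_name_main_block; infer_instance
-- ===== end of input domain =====

-- B replaces A's boolean `skipping` flag with an index walk: an inner skip loop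
-- consumes indented lines after a top-level `if __name__`/`__main__` line and
-- hands the next top-level line back to the outer loop (alternative decomposition, same cost).


-- shared condition transliterations: `line.lstrip() == line` and the two `in` tests
def pvTop (line : String) : Bool := PySem.Str.lstrip line == line
def pvMarker (line : String) : Bool :=
  PySem.Str.isIn "if __name__" line && PySem.Str.isIn "__main__" line

-- ===== PORT A =====
-- loop body of A's `for line in lines` over the state (new_lines, skipping)
def pvStepA (st : List String × Bool) (line : String) : List String × Bool :=
  if st.2 = false then
    if pvTop line && pvMarker line then (st.1, true)
    else (st.1 ++ [line], false)
  else
    if pvTop line then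
      if pvMarker line then (st.1, true)
      else (st.1 ++ [line], false)
    else (st.1, true)

def remove_if_name_main_block (lines : List String) : List String :=
  (lines.foldl pvStepA ([], false)).1

-- ===== PORT B =====
-- inner while: advance past indented lines, leaving the top-level line in place
def pvSkipIndented : List String → List String
  | [] => []
  | l :: rest => if pvTop l then l :: rest else pvSkipIndented rest

-- outer while over the remaining lines
def pvGoB : List String → List String
  | [] => []
  | l :: rest =>
    if pvTop l && pvMarker l then pvGoB (pvSkipIndented rest)
    else l :: pvGoB rest
termination_by ls => ls.length
decreasing_by
  · have h : (pvSkipIndented rest).length ≤ rest.length := by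
      induction rest with
      | nil => simp [pvSkipIndented]
      | cons x xs ih => simp only [pvSkipIndented]; split; · simp
                        · simp; omega
    simp; omega
  · simp

def remove_if_name_main_block_alt (lines : List String) : List String := pvGoB lines

-- ===== PRECONDITION & SPEC =====
def Spec_remove_if_name_main_block (lines : List String) (out : List String) : Prop := out = remove_if_name_main_block_alt lines
instance (lines : List String) (out : List String) : Decidable (Spec_remove_if_name_main_block lines out) := by unfold Spec_remove_if_name_main_block; infer_instance

-- ===== CLAIM (what is proved, stated in full; the proofs are below) =====
def Claim_equal_remove_if_name_main_block : Prop := ∀ (lines : List String), Dom_remove_if_name_main_block lines → Spec_remove_if_name_main_block lines (remove_if_name_main_block lines)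

-- ===== LEMMAS AND PROOFS =====
-- Invariant: from `skipping = false` the fold produces `acc ++ pvGoB ls`; from
-- `skipping = true` it produces `acc ++ pvGoB (pvSkipIndented ls)`.
lemma pv_fold_key (ls : List String) : ∀ acc : List String,
    (ls.foldl pvStepA (acc, false)).1 = acc ++ pvGoB ls ∧
    (ls.foldl pvStepA (acc, true)).1 = acc ++ pvGoB (pvSkipIndented ls) := by
  induction ls with
  | nil => intro acc; simp [pvGoB, pvSkipIndented]
  | cons l rest ih =>
    intro acc
    refine ⟨?_, ?_⟩
    · rw [List.foldl_cons]
      by_cases hc : (pvTop l && pvMarker l) = true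
      · rw [show pvStepA (acc, false) l = (acc, true) by simp [pvStepA, hc], (ih acc).2]
        simp [pvGoB, hc]
      · rw [show pvStepA (acc, false) l = (acc ++ [l], false) by simp [pvStepA, hc],
          (ih (acc ++ [l])).1]
        simp [pvGoB, hc]
    · rw [List.foldl_cons]
      by_cases ht : pvTop l = true
      · by_cases hm : pvMarker l = true
        · rw [show pvStepA (acc, true) l = (acc, true) by simp [pvStepA, ht, hm], (ih acc).2]
          simp [pvSkipIndented, ht, pvGoB, hm]
        · rw [show pvStepA (acc, true) l = (acc ++ [l], false) by simp [pvStepA, ht, hm],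
            (ih (acc ++ [l])).1]
          simp [pvSkipIndented, ht, pvGoB, hm]
      · rw [show pvStepA (acc, true) l = (acc, true) by simp [pvStepA, ht], (ih acc).2]
        simp [pvSkipIndented, ht]

-- ===== VERDICT (by name: the statement is the Claim_ definition above) =====
theorem remove_if_name_main_block_spec : Claim_equal_remove_if_name_main_block := by
  intro lines _
  show remove_if_name_main_block lines = remove_if_name_main_block_alt lines
  unfold remove_if_name_main_block remove_if_name_main_block_alt
  simpa using (pv_fold_key lines []).1
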